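-- pv_equiv track=rewrite | github.com/HeyDavid633/EuroSys25-test | bak/SC24-reference/script/search1_random.py | translate_value
-- ===== SOURCE A (Python) =====
-- def translate_value(value):
--     binary_str = bin(value)[2:].zfill(16)  # 将整数值转换为16位二进制字符串
--     result = []
--     segment_count = 0
--     segment_start = None
--     prev_bit = None
--
--     for i in range(1, 16):
--         if i == 1:
--             prev_bit = binary_str[i]
--             segment_start = i
--         elif binary_str[i] == prev_bit:
--             continue
--         else:
--             if i - segment_start > 1:
--                 result.extend([segment_start, i - 1])
--                 segment_count += 1
--             prev_bit = binary_str[i]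
--             segment_start = i
--
--     if 16 - segment_start > 1:  # 处理最后一个 segment
--         result.extend([segment_start, 15])
--         segment_count += 1
--
--     if segment_count == 1 and result[0] == 0 and result[-1] == 15:
--         segment_count = 0
--         result = []
--
--     # return f"{binary_str} {binary_str[0]} {segment_count} {' '.join(map(str, result)) if segment_count > 0 else ''}"
--     return f"{binary_str[0]} {segment_count} {' '.join(map(str, result)) if segment_count > 0 else ''}"
-- ===== SOURCE B (Python) =====
-- def translate_value(value):
--     binary_str = bin(value)[2:].zfill(16)
--     bounds = [1] + [i for i in range(2, 16) if binary_str[i] != binary_str[i - 1]] + [16]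
--     result = [x for a, b in zip(bounds, bounds[1:]) if b - a > 1 for x in (a, b - 1)]
--     segment_count = len(result) // 2
--     return f"{binary_str[0]} {segment_count} {' '.join(map(str, result)) if segment_count > 0 else ''}"
-- ===== Notes on version B (the rewrite author's own statement) =====
-- stated objective: alternative
-- what changed: Replaced A's single-pass prev_bit/segment_start state machine (with its separate trailing-segment handling, running counter and dead first-element special case) by staged passes: first build the full boundary list [1]+[change positions]+[16] by adjacent comparison, then pair consecutive boundaries with zip and keep pairs spanning more than one bit; segment_count is half the result length.
import Mathlib
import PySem

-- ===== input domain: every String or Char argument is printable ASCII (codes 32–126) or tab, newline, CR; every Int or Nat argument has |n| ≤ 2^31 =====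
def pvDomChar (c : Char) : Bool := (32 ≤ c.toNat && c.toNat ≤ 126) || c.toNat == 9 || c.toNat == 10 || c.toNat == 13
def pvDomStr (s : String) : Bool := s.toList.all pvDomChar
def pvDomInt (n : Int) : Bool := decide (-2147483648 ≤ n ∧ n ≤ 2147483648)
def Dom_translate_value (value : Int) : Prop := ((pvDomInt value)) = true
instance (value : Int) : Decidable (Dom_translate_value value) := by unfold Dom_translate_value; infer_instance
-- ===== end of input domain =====

-- B replaces A's prev_bit/segment_start state machine by staged passes: build the boundary
-- list [1]+changes+[16] by adjacent comparison, then pair consecutive boundaries with zip.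

-- ===== PORT A =====

-- binary digits of a natural number (empty for 0); helper for bin(value)
def pvNatBin : Nat → List Char
  | 0 => []
  | n + 1 => pvNatBin ((n + 1) / 2) ++ [if (n + 1) % 2 == 1 then '1' else '0']
decreasing_by exact Nat.div_lt_self (Nat.succ_pos n) (by norm_num)

-- bin(value)[2:]: digits of |value|, with 'b' kept in front for negative value (bin(-5)[2:] = "b101")
def pvBinTail (v : Int) : List Char :=
  let ds := if v.natAbs = 0 then ['0'] else pvNatBin v.natAbs
  if v < 0 then 'b' :: ds else ds

-- bin(value)[2:].zfill(16) (no sign character present, so zfill is a plain left pad)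
def pvBinStr (v : Int) : List Char :=
  let d := pvBinTail v
  List.replicate (16 - d.length) '0' ++ d

-- ' '.join(map(str, result))
def pvJoinInts (xs : List Int) : String :=
  String.intercalate " " (xs.map PySem.Int.toStr)

-- A's for-loop over i in range(2,16) (the i == 1 arm of the Python loop only initialises
-- prev_bit := s[1], segment_start := 1 and is performed at the call site), plus the
-- trailing "16 - segment_start > 1" segment handling in the terminal case.
-- s.getD is total here because zfill guarantees len(binary_str) ≥ 16, so s[i] never raises.
def pvALoop (s : List Char) (i st : Nat) (p : Char) (res : List Int) (cnt : Int) :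
    List Int × Int :=
  if _h : i < 16 then
    let c := s.getD i ' '
    if c == p then pvALoop s (i + 1) st p res cnt
    else if i - st > 1 then
      pvALoop s (i + 1) i c (res ++ [(st : Int), (i : Int) - 1]) (cnt + 1)
    else pvALoop s (i + 1) i c res cnt
  else if 16 - st > 1 then (res ++ [(st : Int), 15], cnt + 1) else (res, cnt)
termination_by 16 - i

def translate_value (value : Int) : String :=
  let s := pvBinStr value
  let rc := pvALoop s 2 1 (s.getD 1 ' ') [] 0
  -- result[0] / result[-1] are only reached when segment_count == 1 (result then has 2 elements),
  -- so the total getD below is exact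
  let rc2 :=
    if rc.2 == 1 && rc.1.getD 0 0 == 0 && rc.1.getD (rc.1.length - 1) 0 == 15 then
      (([] : List Int), (0 : Int))
    else rc
  String.ofList [s.getD 0 ' '] ++ " " ++ PySem.Int.toStr rc2.2 ++ " " ++
    (if rc2.2 > 0 then pvJoinInts rc2.1 else "")

-- ===== PORT B =====

def translate_value_alt (value : Int) : String :=
  let s := pvBinStr value
  -- bounds = [1] + [i for i in range(2, 16) if s[i] != s[i-1]] + [16]
  let bounds : List Nat :=
    1 :: ((List.range' 2 14).filter (fun i => !(s.getD i ' ' == s.getD (i - 1) ' ')) ++ [16])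
  -- result = [x for a, b in zip(bounds, bounds[1:]) if b - a > 1 for x in (a, b - 1)]
  let res : List Int := (bounds.zip bounds.tail).flatMap
    (fun q => if q.2 - q.1 > 1 then [(q.1 : Int), (q.2 : Int) - 1] else [])
  let cnt : Int := ((res.length / 2 : Nat) : Int)
  String.ofList [s.getD 0 ' '] ++ " " ++ PySem.Int.toStr cnt ++ " " ++
    (if cnt > 0 then pvJoinInts res else "")

-- ===== PRECONDITION & SPEC =====
def Spec_translate_value (value : Int) (out : String) : Prop := out = translate_value_alt value
instance (value : Int) (out : String) : Decidable (Spec_translate_value value out) := by unfold Spec_translate_value; infer_instance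

-- ===== CLAIM (what is proved, stated in full; the proofs are below) =====
def Claim_equal_translate_value : Prop := ∀ (value : Int), Dom_translate_value value → Spec_translate_value value (translate_value value)

-- ===== LEMMAS AND PROOFS =====

-- list-consuming version of A's loop (rem = s[i:16])
def pvALoopL : List Char → Nat → Nat → Char → List Int → Int → List Int × Int
  | [], _, st, _, res, cnt =>
    if 16 - st > 1 then (res ++ [(st : Int), 15], cnt + 1) else (res, cnt)
  | c :: rest, i, st, p, res, cnt =>
    if c == p then pvALoopL rest (i + 1) st p res cnt
    else if i - st > 1 then
      pvALoopL rest (i + 1) i c (res ++ [(st : Int), (i : Int) - 1]) (cnt + 1)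
    else pvALoopL rest (i + 1) i c res cnt

-- boundary positions (indices whose bit differs from the previous bit) of the remainder
def pvChanges : Char → List Char → Nat → List Nat
  | _, [], _ => []
  | p, c :: rest, i => (if c == p then [] else [i]) ++ pvChanges c rest (i + 1)

-- segments determined by a start boundary and the remaining boundary list (end = 16)
def pvSegs : Nat → List Nat → List Int
  | st, [] => if 16 - st > 1 then [(st : Int), 15] else []
  | st, b :: bs => (if b - st > 1 then [(st : Int), (b : Int) - 1] else []) ++ pvSegs b bs

theorem pvBinStr_length (v : Int) : 16 ≤ (pvBinStr v).length := by
  simp [pvBinStr]; omega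

theorem pvALoop_eq_pvALoopL (s : List Char) (hs : 16 ≤ s.length) :
    ∀ (n i st : Nat) (p : Char) (res : List Int) (cnt : Int), i + n = 16 →
      pvALoop s i st p res cnt = pvALoopL ((s.drop i).take n) i st p res cnt := by
  intro n
  induction n with
  | zero =>
    intro i st p res cnt h
    simp only [Nat.add_zero] at h
    subst h
    rw [List.take_zero, pvALoop, pvALoopL]
    simp
  | succ n ih =>
    intro i st p res cnt h
    have hi : i < 16 := by omega
    have hil : i < s.length := by omega
    have hdrop : s.drop i = s[i] :: s.drop (i + 1) := by
      rw [List.drop_eq_getElem_cons hil]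
    rw [pvALoop]
    simp only [dif_pos hi]
    rw [hdrop]
    simp only [List.take_succ_cons, pvALoopL]
    have hgd : s.getD i ' ' = s[i] := by simp [List.getD, hil]
    rw [hgd]
    by_cases hc : s[i] == p
    · simp only [hc, if_pos]
      exact ih (i + 1) st p res cnt (by omega)
    · simp only [hc, Bool.false_eq_true, if_false]
      by_cases hl : i - st > 1
      · simp only [if_pos hl]
        exact ih (i + 1) i s[i] _ _ (by omega)
      · simp only [if_neg hl]
        exact ih (i + 1) i s[i] _ _ (by omega)

theorem pvALoopL_eq_segs (rem : List Char) :
    ∀ (i st : Nat) (p : Char) (res : List Int) (cnt : Int),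
      pvALoopL rem i st p res cnt =
        (res ++ pvSegs st (pvChanges p rem i),
         cnt + ((pvSegs st (pvChanges p rem i)).length / 2 : Nat)) := by
  induction rem with
  | nil =>
    intro i st p res cnt
    rw [pvALoopL, pvChanges, pvSegs]
    by_cases h : 16 - st > 1 <;> simp [h]
  | cons c rest ih =>
    intro i st p res cnt
    rw [pvALoopL, pvChanges]
    by_cases hc : c == p
    · have hcp : c = p := by simpa using hc
      subst hcp
      simp only [hc, if_pos, List.nil_append]
      exact ih (i + 1) st c res cnt
    · simp only [hc, Bool.false_eq_true, if_false, List.singleton_append]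
      rw [pvSegs]
      by_cases hl : i - st > 1
      · simp only [if_pos hl]
        rw [ih (i + 1) i c (res ++ [(st : Int), (i : Int) - 1]) (cnt + 1)]
        simp only [List.append_assoc, List.cons_append, List.nil_append, Prod.mk.injEq]
        refine ⟨trivial, ?_⟩
        have hlen2 : ((st : Int) :: ((i : Int) - 1) :: pvSegs i (pvChanges c rest (i + 1))).length
            = (pvSegs i (pvChanges c rest (i + 1))).length + 2 := by
          simp
        rw [hlen2]
        have hdiv : ((pvSegs i (pvChanges c rest (i + 1))).length + 2) / 2
            = (pvSegs i (pvChanges c rest (i + 1))).length / 2 + 1 := by omega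
        rw [hdiv]
        push_cast
        ring
      · simp only [if_neg hl, List.nil_append]
        exact ih (i + 1) i c res cnt

theorem filter_eq_pvChanges (s : List Char) :
    ∀ (n i : Nat), 1 ≤ i → i + n ≤ s.length →
      (List.range' i n).filter (fun j => !(s.getD j ' ' == s.getD (j - 1) ' ')) =
        pvChanges (s.getD (i - 1) ' ') ((s.drop i).take n) i := by
  intro n
  induction n with
  | zero => intro i _ _; simp [pvChanges]
  | succ n ih =>
    intro i h1 h2
    have hil : i < s.length := by omega
    have hdrop : s.drop i = s[i] :: s.drop (i + 1) := List.drop_eq_getElem_cons hil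
    rw [List.range'_succ, hdrop, List.take_succ_cons, pvChanges, List.filter_cons]
    have hgd : s.getD i ' ' = s[i] := by simp [List.getD, hil]
    have hrec := ih (i + 1) (by omega) (by omega)
    have he : i + 1 - 1 = i := by omega
    rw [he, hgd] at hrec
    rw [hgd, hrec]
    split_ifs <;> simp_all

theorem zip_flatMap_eq_segs :
    ∀ (bl : List Nat) (st : Nat),
      ((((st :: (bl ++ [16])) : List Nat).zip ((bl ++ [16]) : List Nat)).flatMap
        (fun q : Nat × Nat =>
          if q.2 - q.1 > 1 then [(q.1 : Int), (q.2 : Int) - 1] else []))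
        = pvSegs st bl := by
  intro bl
  induction bl with
  | nil =>
    intro st
    rw [pvSegs]
    simp only [List.nil_append, List.zip_cons_cons, List.zip_nil_right,
      List.flatMap_cons, List.flatMap_nil, List.append_nil]
    by_cases h : 16 - st > 1
    · simp only [if_pos h]
      norm_num
    · simp [h]
  | cons b bs ih =>
    intro st
    rw [pvSegs]
    simp only [List.cons_append, List.zip_cons_cons, List.flatMap_cons]
    rw [ih b]

theorem pvChanges_mem_ge :
    ∀ (rem : List Char) (p : Char) (i : Nat) (j : Nat), j ∈ pvChanges p rem i → i ≤ j := by
  intro rem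
  induction rem with
  | nil => intro p i j h; simp [pvChanges] at h
  | cons c rest ih =>
    intro p i j h
    rw [pvChanges] at h
    simp only [List.mem_append] at h
    rcases h with h | h
    · split at h <;> simp at h
      omega
    · have := ih c (i + 1) j h
      omega

theorem pvSegs_mem_ge :
    ∀ (bl : List Nat) (st : Nat), 1 ≤ st → (∀ b ∈ bl, 1 ≤ b) →
      ∀ x ∈ pvSegs st bl, 1 ≤ x := by
  intro bl
  induction bl with
  | nil =>
    intro st hst _ x hx
    rw [pvSegs] at hx
    split at hx <;> simp at hx
    rcases hx with rfl | rfl <;> omega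
  | cons b bs ih =>
    intro st hst hbl x hx
    rw [pvSegs] at hx
    simp only [List.mem_append] at hx
    rcases hx with hx | hx
    · split at hx
      · rename_i hgt
        simp at hx
        rcases hx with rfl | rfl
        · omega
        · have : 1 ≤ b := hbl b (by simp)
          omega
      · simp at hx
    · exact ih b (hbl b (by simp)) (fun b' hb' => hbl b' (by simp [hb'])) x hx

theorem segs_getD_ne_zero (bl : List Nat) (hbl : ∀ b ∈ bl, 1 ≤ b)
    (hne : pvSegs 1 bl ≠ []) : ((pvSegs 1 bl).getD 0 0 == 0) = false := by
  cases hL : pvSegs 1 bl with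
  | nil => exact absurd hL hne
  | cons y ys =>
    have hy : (1 : Int) ≤ y := pvSegs_mem_ge bl 1 le_rfl hbl y (by rw [hL]; simp)
    simp only [List.getD_cons_zero, beq_eq_false_iff_ne, ne_eq]
    omega

theorem translate_value_spec : Claim_equal_translate_value := by
  intro value _
  unfold Spec_translate_value
  simp only [translate_value, translate_value_alt]
  have hlen := pvBinStr_length value
  set s := pvBinStr value with hs
  -- the filter list of B equals the change list of the remainder
  have hfc := filter_eq_pvChanges s 14 2 (by omega) (by omega)
  have he : (2 - 1 : Nat) = 1 := rfl
  rw [he] at hfc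
  set bl := (List.range' 2 14).filter (fun j => !(s.getD j ' ' == s.getD (j - 1) ' ')) with hbl
  -- A's loop equals segments of the change list
  have h1 : pvALoop s 2 1 (s.getD 1 ' ') [] 0 =
      pvALoopL ((s.drop 2).take 14) 2 1 (s.getD 1 ' ') [] 0 :=
    pvALoop_eq_pvALoopL s hlen 14 2 1 _ [] 0 rfl
  have h2 := pvALoopL_eq_segs ((s.drop 2).take 14) 2 1 (s.getD 1 ' ') [] 0
  rw [← hfc] at h2
  set L := pvSegs 1 bl with hL
  have hrc : pvALoop s 2 1 (s.getD 1 ' ') [] 0 = (L, ((L.length / 2 : Nat) : Int)) := by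
    rw [h1, h2]; simp
  -- B's zip/flatMap equals the same segments
  have h3 := zip_flatMap_eq_segs bl 1
  rw [hrc]
  -- A's special-case branch never fires: every emitted index is ≥ 1
  have hblge : ∀ b ∈ bl, 1 ≤ b := by
    intro b hb
    rw [hfc] at hb
    have := pvChanges_mem_ge _ _ _ _ hb
    omega
  have hcond : ((((L, ((L.length / 2 : Nat) : Int)) : List Int × Int).2 == 1 &&
      L.getD 0 0 == 0) && L.getD (L.length - 1) 0 == 15) = false := by
    by_cases hne : L = []
    · rw [hne]; simp
    · rw [show (L.getD 0 0 == 0) = false from segs_getD_ne_zero bl hblge (hL ▸ hne)]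
      simp
  simp only [hcond, Bool.false_eq_true, if_false, List.tail_cons]
  rw [h3]
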